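-- pv_equiv track=rewrite | github.com/tillo13/mr_beast_puzzle | puzzles/01_wells_africa/scripts/wordsearch.py | extract_line
-- ===== SOURCE A (Python) =====
-- grid = [
--     ['M', '.', 'R', 'A', 'Y', '.', 'C', 'O', 'N'],
--     ['U', 'A', 'N', 'L', '.', 'C', 'S', 'T', 'I'],
--     ['.', 'H', 'D', '.', 'O', 'A', 'I', 'D', 'A'],
--     ['N', 'D', 'T', 'R', 'W', 'O', '.', 'R', 'R'],
--     ['N', 'E', 'W', 'P', 'E', 'N', 'A', 'E', 'T'],
--     ['.', 'C', '.', 'I', 'I', 'V', 'I', 'N', '.'],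
--     ['P', 'E', 'D', 'B', 'N', 'S', '.', '.', 'C'],
--     ['Y', '.', 'O', 'H', '.', 'K', 'W', 'C', '.'],
--     ['T', 'R', 'O', 'R', 'D', 'K', '.', 'S', 'C'],
-- ]
--
-- ROWS = len(grid)
--
-- COLS = len(grid[0])
--
-- def extract_line(r, c, dr, dc, max_len=9):
--     """Extract characters along a direction from (r,c), up to max_len or grid edge.
--     Returns list of (row, col, char) tuples."""
--     cells = []
--     cr, cc = r, c
--     while 0 <= cr < ROWS and 0 <= cc < COLS and len(cells) < max_len:
--         cells.append((cr, cc, grid[cr][cc]))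
--         cr += dr
--         cc += dc
--     return cells
-- ===== SOURCE B (Python) =====
-- grid = [
--     ['M', '.', 'R', 'A', 'Y', '.', 'C', 'O', 'N'],
--     ['U', 'A', 'N', 'L', '.', 'C', 'S', 'T', 'I'],
--     ['.', 'H', 'D', '.', 'O', 'A', 'I', 'D', 'A'],
--     ['N', 'D', 'T', 'R', 'W', 'O', '.', 'R', 'R'],
--     ['N', 'E', 'W', 'P', 'E', 'N', 'A', 'E', 'T'],
--     ['.', 'C', '.', 'I', 'I', 'V', 'I', 'N', '.'],
--     ['P', 'E', 'D', 'B', 'N', 'S', '.', '.', 'C'],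
--     ['Y', '.', 'O', 'H', '.', 'K', 'W', 'C', '.'],
--     ['T', 'R', 'O', 'R', 'D', 'K', '.', 'S', 'C'],
-- ]
--
-- ROWS = len(grid)
--
-- COLS = len(grid[0])
--
--
-- def _axis_limit(p, d, bound):
--     """Number of steps that keep index p (stepping by d) inside [0, bound);
--     None means unbounded (d == 0 with p in range)."""
--     if not (0 <= p < bound):
--         return 0
--     if d > 0:
--         return (bound - 1 - p) // d + 1
--     if d < 0:
--         return p // (-d) + 1
--     return None
--
--
-- def extract_line(r, c, dr, dc, max_len=9):
--     n = max(0, max_len)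
--     for lim in (_axis_limit(r, dr, ROWS), _axis_limit(c, dc, COLS)):
--         if lim is not None:
--             n = min(n, lim)
--     return [(r + i * dr, c + i * dc, grid[r + i * dr][c + i * dc]) for i in range(n)]
-- ===== Notes on version B (the rewrite author's own statement) =====
-- stated objective: alternative
-- what changed: Replaces A's while-loop that tests the grid edge every step with a closed-form per-axis step count (floor division by the step, zero step = unbounded) followed by a single index-driven comprehension over range(n).
import Mathlib
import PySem

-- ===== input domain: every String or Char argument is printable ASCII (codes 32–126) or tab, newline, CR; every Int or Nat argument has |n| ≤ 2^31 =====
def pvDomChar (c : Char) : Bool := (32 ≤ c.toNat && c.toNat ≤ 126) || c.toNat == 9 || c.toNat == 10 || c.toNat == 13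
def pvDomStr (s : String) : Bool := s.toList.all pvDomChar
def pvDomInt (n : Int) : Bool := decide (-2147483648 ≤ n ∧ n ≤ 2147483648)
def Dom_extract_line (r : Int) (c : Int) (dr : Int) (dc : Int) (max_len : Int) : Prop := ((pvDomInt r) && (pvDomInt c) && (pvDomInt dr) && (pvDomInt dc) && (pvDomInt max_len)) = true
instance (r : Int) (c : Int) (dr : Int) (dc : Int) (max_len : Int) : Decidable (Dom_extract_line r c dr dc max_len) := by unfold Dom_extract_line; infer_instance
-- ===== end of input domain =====

-- B replaces A's edge-testing while-loop by a closed-form step count per axis plus one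
-- index-driven comprehension (objective: alternative; same asymptotic cost).

-- the module-level grid (shared context of both programs); ROWS = COLS = 9
def pvGrid : List (List String) :=
  [["M", ".", "R", "A", "Y", ".", "C", "O", "N"],
   ["U", "A", "N", "L", ".", "C", "S", "T", "I"],
   [".", "H", "D", ".", "O", "A", "I", "D", "A"],
   ["N", "D", "T", "R", "W", "O", ".", "R", "R"],
   ["N", "E", "W", "P", "E", "N", "A", "E", "T"],
   [".", "C", ".", "I", "I", "V", "I", "N", "."],
   ["P", "E", "D", "B", "N", "S", ".", ".", "C"],
   ["Y", ".", "O", "H", ".", "K", "W", "C", "."],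
   ["T", "R", "O", "R", "D", "K", ".", "S", "C"]]

-- grid[i][j]; both programs only evaluate it with 0 ≤ i,j < 9, where pyGet? is
-- exactly Python's indexing, so the getD defaults are never reached
def pvCell (i j : Int) : String :=
  (PySem.List.pyGet? ((PySem.List.pyGet? pvGrid i).getD []) j).getD ""

-- ===== PORT A =====
-- the while-loop of A, state = (cells, cr, cc)
def extract_line_go (dr dc max_len : Int) (cells : List (Int × Int × String)) (cr cc : Int) :
    List (Int × Int × String) :=
  if _h : 0 ≤ cr ∧ cr < 9 ∧ 0 ≤ cc ∧ cc < 9 ∧ (cells.length : Int) < max_len then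
    extract_line_go dr dc max_len (cells ++ [(cr, cc, pvCell cr cc)]) (cr + dr) (cc + dc)
  else cells
termination_by (max_len - cells.length).toNat
decreasing_by simp only [List.length_append, List.length_cons, List.length_nil]; omega

def extract_line (r : Int) (c : Int) (dr : Int) (dc : Int) (max_len : Int) : List (Int × Int × String) :=
  extract_line_go dr dc max_len [] r c

-- ===== PORT B =====
-- B's helper _axis_limit: steps keeping p in [0, bound); none = unbounded (d = 0 in range)
def axisLimit (p d bound : Int) : Option Int :=
  if ¬ (0 ≤ p ∧ p < bound) then some 0
  else if d > 0 then some (PySem.Int.floordiv (bound - 1 - p) d + 1)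
  else if d < 0 then some (PySem.Int.floordiv p (-d) + 1)
  else none

def extract_line_alt (r : Int) (c : Int) (dr : Int) (dc : Int) (max_len : Int) : List (Int × Int × String) :=
  let n0 := max 0 max_len
  let n1 := match axisLimit r dr 9 with | some l => min n0 l | none => n0
  let n2 := match axisLimit c dc 9 with | some l => min n1 l | none => n1
  (PySem.List.pyRange 0 n2 1).map (fun i => (r + i * dr, c + i * dc, pvCell (r + i * dr) (c + i * dc)))

-- ===== PRECONDITION & SPEC =====
def Spec_extract_line (r : Int) (c : Int) (dr : Int) (dc : Int) (max_len : Int) (out : List (Int × Int × String)) : Prop := out = extract_line_alt r c dr dc max_len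
instance (r : Int) (c : Int) (dr : Int) (dc : Int) (max_len : Int) (out : List (Int × Int × String)) : Decidable (Spec_extract_line r c dr dc max_len out) := by unfold Spec_extract_line; infer_instance

-- ===== CLAIM (what is proved, stated in full; the proofs are below) =====
def Claim_equal_extract_line : Prop := ∀ (r : Int) (c : Int) (dr : Int) (dc : Int) (max_len : Int), Dom_extract_line r c dr dc max_len → Spec_extract_line r c dr dc max_len (extract_line r c dr dc max_len)

-- ===== LEMMAS AND PROOFS =====

-- proof-only middle form of A's loop: fuel counts the remaining capacity
def gLine (dr dc : Int) (cr cc fuel : Int) : List (Int × Int × String) :=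
  if _h : 0 ≤ cr ∧ cr < 9 ∧ 0 ≤ cc ∧ cc < 9 ∧ 0 < fuel then
    (cr, cc, pvCell cr cc) :: gLine dr dc (cr + dr) (cc + dc) (fuel - 1)
  else []
termination_by fuel.toNat
decreasing_by omega

lemma go_eq_gLine (dr dc ml : Int) (fuel : Nat) :
    ∀ (cells : List (Int × Int × String)) (cr cc : Int),
      (ml - cells.length).toNat = fuel →
      extract_line_go dr dc ml cells cr cc = cells ++ gLine dr dc cr cc (ml - cells.length) := by
  induction fuel with
  | zero =>
    intro cells cr cc hf
    rw [extract_line_go, gLine]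
    have : ¬ (0 < ml - (cells.length : Int)) := by omega
    rw [dif_neg (by omega), dif_neg (by omega)]
    simp
  | succ n ih =>
    intro cells cr cc hf
    rw [extract_line_go, gLine]
    by_cases hb : 0 ≤ cr ∧ cr < 9 ∧ 0 ≤ cc ∧ cc < 9
    · by_cases hml : (cells.length : Int) < ml
      · rw [dif_pos ⟨hb.1, hb.2.1, hb.2.2.1, hb.2.2.2, hml⟩,
            dif_pos ⟨hb.1, hb.2.1, hb.2.2.1, hb.2.2.2, by omega⟩]
        rw [ih (cells ++ [(cr, cc, pvCell cr cc)]) (cr + dr) (cc + dc)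
              (by simp only [List.length_append, List.length_cons, List.length_nil]; omega)]
        simp only [List.length_append, List.length_cons, List.length_nil, List.append_assoc,
          List.cons_append, List.nil_append]
        congr 2
        push_cast
        ring_nf
      · rw [dif_neg (by omega), dif_neg (by omega)]
        simp
    · rw [dif_neg (by tauto), dif_neg (by tauto)]
      simp

-- B's step count
def nCount (r c dr dc ml : Int) : Int :=
  let n0 := max 0 ml
  let n1 := match axisLimit r dr 9 with | some l => min n0 l | none => n0
  match axisLimit c dc 9 with | some l => min n1 l | none => n1

lemma axisLimit_out {p d bound : Int} (h : ¬ (0 ≤ p ∧ p < bound)) : axisLimit p d bound = some 0 := by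
  unfold axisLimit; rw [if_pos h]

lemma axisLimit_step {p d : Int} (hp0 : 0 ≤ p) (hp9 : p < 9) (hd : d ≠ 0) :
    ∃ L, axisLimit p d 9 = some L ∧ 1 ≤ L ∧ axisLimit (p + d) d 9 = some (L - 1) := by
  rcases lt_or_gt_of_ne hd with hneg | hpos
  · refine ⟨PySem.Int.floordiv p (-d) + 1, ?_, ?_, ?_⟩
    · unfold axisLimit
      rw [if_neg (by omega), if_neg (by omega), if_pos hneg]
    · rw [PySem.Int.floordiv_eq_ediv_of_pos (by omega)]
      have := Int.ediv_nonneg hp0 (by omega : (0:Int) ≤ -d)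
      omega
    · by_cases h2 : 0 ≤ p + d
      · unfold axisLimit
        rw [if_neg (by omega), if_neg (by omega), if_pos hneg]
        rw [PySem.Int.floordiv_eq_ediv_of_pos (by omega : (0:Int) < -d),
            PySem.Int.floordiv_eq_ediv_of_pos (by omega : (0:Int) < -d)]
        have e1 : p + d = p + (-1) * (-d) := by ring
        rw [e1, Int.add_mul_ediv_right _ _ (by omega : (-d) ≠ 0)]
        congr 1
        ring
      · rw [axisLimit_out (by omega)]
        rw [PySem.Int.floordiv_eq_ediv_of_pos (by omega : (0:Int) < -d)]
        have : p / (-d) = 0 := Int.ediv_eq_zero_of_lt hp0 (by omega)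
        rw [this]
        norm_num
  · refine ⟨PySem.Int.floordiv (9 - 1 - p) d + 1, ?_, ?_, ?_⟩
    · unfold axisLimit
      rw [if_neg (by omega), if_pos hpos]
    · rw [PySem.Int.floordiv_eq_ediv_of_pos (by omega)]
      have := Int.ediv_nonneg (by omega : (0:Int) ≤ 9 - 1 - p) (le_of_lt hpos)
      omega
    · by_cases h2 : p + d < 9
      · unfold axisLimit
        rw [if_neg (by omega), if_pos hpos]
        rw [PySem.Int.floordiv_eq_ediv_of_pos hpos, PySem.Int.floordiv_eq_ediv_of_pos hpos]
        have e1 : 9 - 1 - (p + d) = (9 - 1 - p) + (-1) * d := by ring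
        rw [e1, Int.add_mul_ediv_right _ _ (by omega : d ≠ 0)]
        congr 1
        ring
      · rw [axisLimit_out (by omega)]
        rw [PySem.Int.floordiv_eq_ediv_of_pos hpos]
        have : (9 - 1 - p) / d = 0 := Int.ediv_eq_zero_of_lt (by omega) (by omega)
        rw [this]
        norm_num

lemma nCount_step {r c dr dc ml : Int} (hr0 : 0 ≤ r) (hr9 : r < 9) (hc0 : 0 ≤ c) (hc9 : c < 9)
    (hml : 0 < ml) :
    1 ≤ nCount r c dr dc ml ∧
      nCount (r + dr) (c + dc) dr dc (ml - 1) = nCount r c dr dc ml - 1 := by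
  by_cases hdr : dr = 0 <;> by_cases hdc : dc = 0
  · subst hdr; subst hdc
    have hA : axisLimit r 0 9 = none := by
      unfold axisLimit; rw [if_neg (by omega)]; norm_num
    have hB : axisLimit c 0 9 = none := by
      unfold axisLimit; rw [if_neg (by omega)]; norm_num
    simp only [nCount, add_zero, hA, hB]
    show 1 ≤ max 0 ml ∧ max 0 (ml - 1) = max 0 ml - 1
    omega
  · subst hdr
    obtain ⟨M, hM1, hM2, hM3⟩ := axisLimit_step hc0 hc9 hdc
    have hA : axisLimit r 0 9 = none := by
      unfold axisLimit; rw [if_neg (by omega)]; norm_num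
    simp only [nCount, add_zero, hA, hM1, hM3]
    show 1 ≤ min (max 0 ml) M ∧ min (max 0 (ml - 1)) (M - 1) = min (max 0 ml) M - 1
    omega
  · subst hdc
    obtain ⟨L, hL1, hL2, hL3⟩ := axisLimit_step hr0 hr9 hdr
    have hB : axisLimit c 0 9 = none := by
      unfold axisLimit; rw [if_neg (by omega)]; norm_num
    simp only [nCount, add_zero, hB, hL1, hL3]
    show 1 ≤ min (max 0 ml) L ∧ min (max 0 (ml - 1)) (L - 1) = min (max 0 ml) L - 1
    omega
  · obtain ⟨L, hL1, hL2, hL3⟩ := axisLimit_step hr0 hr9 hdr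
    obtain ⟨M, hM1, hM2, hM3⟩ := axisLimit_step hc0 hc9 hdc
    simp only [nCount, hL1, hL3, hM1, hM3]
    show 1 ≤ min (min (max 0 ml) L) M ∧
      min (min (max 0 (ml - 1)) (L - 1)) (M - 1) = min (min (max 0 ml) L) M - 1
    omega

lemma nCount_nonpos_of_stop {r c dr dc ml : Int}
    (h : ¬ (0 ≤ r ∧ r < 9 ∧ 0 ≤ c ∧ c < 9 ∧ 0 < ml)) : nCount r c dr dc ml ≤ 0 := by
  by_cases hr : 0 ≤ r ∧ r < 9
  · by_cases hc : 0 ≤ c ∧ c < 9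
    · have hml : ml ≤ 0 := by omega
      unfold nCount
      cases hA : axisLimit r dr 9 <;> cases hB : axisLimit c dc 9 <;> simp only
      · show max 0 ml ≤ 0
        omega
      · rename_i m
        show min (max 0 ml) m ≤ 0
        omega
      · rename_i l
        show min (max 0 ml) l ≤ 0
        omega
      · rename_i l m
        show min (min (max 0 ml) l) m ≤ 0
        omega
    · have hB : axisLimit c dc 9 = some 0 := axisLimit_out hc
      unfold nCount
      rw [hB]
      cases hA : axisLimit r dr 9 <;> simp only
      · show min (max 0 ml) 0 ≤ 0
        omega
      · rename_i l
        show min (min (max 0 ml) l) 0 ≤ 0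
        omega
  · have hA : axisLimit r dr 9 = some 0 := axisLimit_out hr
    unfold nCount
    rw [hA]
    cases hB : axisLimit c dc 9 <;> simp only
    · show min (max 0 ml) 0 ≤ 0
      omega
    · rename_i m
      show min (min (max 0 ml) 0) m ≤ 0
      omega

lemma gLine_eq_map (dr dc : Int) (fuel : Nat) :
    ∀ (r c ml : Int), ml.toNat = fuel →
      gLine dr dc r c ml =
        (PySem.List.pyRange 0 (nCount r c dr dc ml) 1).map
          (fun i => (r + i * dr, c + i * dc, pvCell (r + i * dr) (c + i * dc))) := by
  induction fuel with
  | zero =>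
    intro r c ml hf
    rw [gLine, dif_neg (by omega)]
    rw [PySem.List.pyRange_one_eq_nil (nCount_nonpos_of_stop (by omega))]
    simp
  | succ n ih =>
    intro r c ml hf
    rw [gLine]
    by_cases hb : 0 ≤ r ∧ r < 9 ∧ 0 ≤ c ∧ c < 9 ∧ 0 < ml
    · rw [dif_pos hb]
      obtain ⟨hN1, hstep⟩ := nCount_step hb.1 hb.2.1 hb.2.2.1 hb.2.2.2.1 hb.2.2.2.2
      rw [ih (r + dr) (c + dc) (ml - 1) (by omega), hstep]
      rw [PySem.List.pyRange_one_cons (by omega : (0:Int) < nCount r c dr dc ml)]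
      rw [List.map_cons]
      congr 1
      · norm_num
      · rw [show (0:Int) + 1 = 1 by norm_num]
        rw [PySem.List.pyRange_one, PySem.List.pyRange_one, List.map_map, List.map_map]
        have hlen : (nCount r c dr dc ml - 1 - 0).toNat = (nCount r c dr dc ml - 1).toNat := by
          omega
        rw [hlen]
        apply List.map_congr_left
        intro k _
        simp only [Function.comp_apply]
        have e1 : r + (1 + (k:Int)) * dr = r + dr + (0 + (k:Int)) * dr := by ring
        have e2 : c + (1 + (k:Int)) * dc = c + dc + (0 + (k:Int)) * dc := by ring
        rw [e1, e2]
    · rw [dif_neg hb]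
      rw [PySem.List.pyRange_one_eq_nil (nCount_nonpos_of_stop hb)]
      simp

-- ===== VERDICT (by name: the statement is the Claim_ definition above) =====
theorem extract_line_spec : Claim_equal_extract_line := by
  intro r c dr dc ml _
  unfold Spec_extract_line extract_line extract_line_alt
  rw [go_eq_gLine dr dc ml (ml - ([] : List (Int × Int × String)).length).toNat [] r c rfl]
  simp only [List.length_nil, Int.natCast_zero, sub_zero, List.nil_append]
  rw [gLine_eq_map dr dc ml.toNat r c ml rfl]
  rfl
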